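-- pv_equiv track=rewrite | github.com/karaage0703/skeleton-sequencer | skeleton_sequencer_mediapipe.py | get_pentatonic_scale
-- ===== SOURCE A (Python) =====
-- def get_pentatonic_scale(note):
--     # C
--     if note % 5 == 0:
--         out_note = note // 5 * 12
--
--     # D#
--     if note % 5 == 1:
--         out_note = note // 5 * 12 + 3
--
--     # F
--     if note % 5 == 2:
--         out_note = note // 5 * 12 + 5
--
--     # G
--     if note % 5 == 3:
--         out_note = note // 5 * 12 + 7
--
--     # A#
--     if note % 5 == 4:
--         out_note = note // 5 * 12 + 10
--
--     out_note += 60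
--     while out_note > 127:
--         out_note -= 128
--
--     return out_note
-- ===== SOURCE B (Python) =====
-- def get_pentatonic_scale(note):
--     # Closed form: the pentatonic offsets 0,3,5,7,10 at residues 0..4 are exactly
--     # floor((12*r+3)/5), so note//5*12 + offset(note%5) collapses to (12*note+3)//5.
--     out_note = (12 * note + 3) // 5 + 60
--     return out_note % 128 if out_note > 127 else out_note
-- ===== Notes on version B (the rewrite author's own statement) =====
-- stated objective: alternative
-- what changed: The per-residue case analysis (the if-cascade picking a pentatonic offset, plus the subtract-128 wrap loop) is replaced by one branch-free closed-form floor-division expression with a single conditional modulo for the wrap; no residue dispatch or offset table remains.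
import Mathlib
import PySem

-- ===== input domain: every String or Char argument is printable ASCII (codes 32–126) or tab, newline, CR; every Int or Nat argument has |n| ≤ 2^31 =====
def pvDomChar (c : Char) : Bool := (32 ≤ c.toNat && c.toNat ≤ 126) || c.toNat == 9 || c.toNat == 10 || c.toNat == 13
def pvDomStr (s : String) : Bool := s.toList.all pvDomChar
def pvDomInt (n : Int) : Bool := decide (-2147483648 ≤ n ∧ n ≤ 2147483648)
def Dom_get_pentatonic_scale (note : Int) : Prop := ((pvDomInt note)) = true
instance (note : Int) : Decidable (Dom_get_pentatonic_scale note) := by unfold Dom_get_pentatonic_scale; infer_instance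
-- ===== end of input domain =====

-- B replaces A's five-way residue dispatch and wrap loop by one closed-form floor-division expression.

-- ===== PORT A =====
-- A's `while out_note > 127: out_note -= 128` loop, as structural recursion on out_note.
def pvWrapA (x : Int) : Int :=
  if h : x > 127 then pvWrapA (x - 128) else x
termination_by x.toNat
decreasing_by omega

def get_pentatonic_scale (note : Int) : Int :=
  let r := PySem.Int.mod note 5
  let q := PySem.Int.floordiv note 5
  -- the five sequential ifs of A; r is fixed and in 0..4, so exactly one assigns out_note
  let out_note : Int :=
    if r = 0 then q * 12
    else if r = 1 then q * 12 + 3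
    else if r = 2 then q * 12 + 5
    else if r = 3 then q * 12 + 7
    else q * 12 + 10  -- r = 4: the only remaining case (note % 5 ∈ 0..4 in Python)
  pvWrapA (out_note + 60)

-- ===== PORT B =====
def get_pentatonic_scale_alt (note : Int) : Int :=
  let out_note : Int := PySem.Int.floordiv (12 * note + 3) 5 + 60
  if out_note > 127 then PySem.Int.mod out_note 128 else out_note

-- ===== PRECONDITION & SPEC =====
def Spec_get_pentatonic_scale (note : Int) (out : Int) : Prop := out = get_pentatonic_scale_alt note
instance (note : Int) (out : Int) : Decidable (Spec_get_pentatonic_scale note out) := by unfold Spec_get_pentatonic_scale; infer_instance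

-- ===== CLAIM (what is proved, stated in full; the proofs are below) =====
def Claim_equal_get_pentatonic_scale : Prop := ∀ (note : Int), Dom_get_pentatonic_scale note → Spec_get_pentatonic_scale note (get_pentatonic_scale note)

-- ===== LEMMAS AND PROOFS =====

-- the subtract-128 loop equals a single conditional (Euclidean) modulo
theorem pvWrapA_eq (x : Int) : pvWrapA x = if x > 127 then x % 128 else x := by
  induction x using pvWrapA.induct with
  | case1 x h ih =>
      rw [pvWrapA, dif_pos h, ih]
      split_ifs with h2 <;> omega
  | case2 x h =>
      rw [pvWrapA, dif_neg h, if_neg h]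

-- A's case-selected out_note equals B's closed form (12*note+3)//5
theorem pvClosedForm (note : Int) :
    (let r := note % 5
     let q := note / 5
     if r = 0 then q * 12
     else if r = 1 then q * 12 + 3
     else if r = 2 then q * 12 + 5
     else if r = 3 then q * 12 + 7
     else q * 12 + 10) = (12 * note + 3) / 5 := by
  simp only []
  split_ifs <;> omega

-- ===== VERDICT (by name: the statement is the Claim_ definition above) =====
theorem get_pentatonic_scale_spec : Claim_equal_get_pentatonic_scale := by
  intro note _
  unfold Spec_get_pentatonic_scale get_pentatonic_scale get_pentatonic_scale_alt
  have hm : PySem.Int.mod note 5 = note % 5 := PySem.Int.mod_eq_emod_of_pos (by norm_num)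
  have hd : PySem.Int.floordiv note 5 = note / 5 := PySem.Int.floordiv_eq_ediv_of_pos (by norm_num)
  have hd2 : PySem.Int.floordiv (12 * note + 3) 5 = (12 * note + 3) / 5 :=
    PySem.Int.floordiv_eq_ediv_of_pos (by norm_num)
  have hm2 : ∀ x : Int, PySem.Int.mod x 128 = x % 128 := fun x =>
    PySem.Int.mod_eq_emod_of_pos (by norm_num)
  simp only [hm, hd, hd2, hm2, pvWrapA_eq]
  rw [pvClosedForm note]
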